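-- pv_equiv track=rewrite | github.com/volcengine/verl | atropos/environments/intern_bootcamp/internbootcamp_lib/internbootcamp/bootcamp/cnetworkmask/cnetworkmask.py | compute_mask
-- ===== SOURCE A (Python) =====
-- def compute_mask(ip_list, net_count):
--     mask_elem = (128, 64, 32, 16, 8, 4, 2, 1)
--     for i in range(4):
--         diff = set()
--         for ip in ip_list:
--             diff.add(tuple(ip[:i+1]))
--         if len(diff) >= net_count:
--             cur_mask_block = 0
--             for j in range(8):
--                 cur_mask_block += mask_elem[j]
--                 abs_diff = set()
--                 for ip in ip_list:
--                     cip = list(ip[:i])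
--                     current_octet = ip[i] & cur_mask_block
--                     cip.append(current_octet)
--                     abs_diff.add(tuple(cip))
--                 current_network_count = len(abs_diff)
--                 if current_network_count == net_count:
--                     mask_parts = ['255'] * i
--                     mask_parts.append(str(cur_mask_block))
--                     mask_parts.extend(['0'] * (3 - i))
--                     return '.'.join(mask_parts)
--                 elif current_network_count > net_count:
--                     return '-1'
--             return '-1'
--     return '-1'
-- ===== SOURCE B (Python) =====
-- def compute_mask(ip_list, net_count):
--     # Two nested linear scans replaced by two binary searches on monotone
--     # distinct-network counts: first the octet index, then the bit count.
--     def pref_count(i):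
--         return len({tuple(ip[:i + 1]) for ip in ip_list})
--
--     def masked_count(i, j):
--         block = 256 - (1 << (7 - j))
--         return len({tuple(ip[:i]) + (ip[i] & block,) for ip in ip_list})
--
--     def lowest(lo, hi, pred):
--         ans = -1
--         while lo <= hi:
--             mid = (lo + hi) // 2
--             if pred(mid):
--                 ans = mid
--                 hi = mid - 1
--             else:
--                 lo = mid + 1
--         return ans
--
--     i = lowest(0, 3, lambda k: pref_count(k) >= net_count)
--     if i < 0:
--         return '-1'
--     j = lowest(0, 7, lambda k: masked_count(i, k) >= net_count)
--     if j < 0: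
--         return '-1'
--     if masked_count(i, j) != net_count:
--         return '-1'
--     block = 256 - (1 << (7 - j))
--     return '.'.join(['255'] * i + [str(block)] + ['0'] * (3 - i))
-- ===== Notes on version B (the rewrite author's own statement) =====
-- stated objective: alternative
-- what changed: A's two nested linear scans with early returns (over the 4 octet positions, then over the 8 mask bits, rebuilding a distinct-network set at each step) are replaced by two binary searches ('lowest') over the monotone distinct-count functions pref_count and masked_count, followed by a single exact-count check and mask construction.
import Mathlib
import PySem

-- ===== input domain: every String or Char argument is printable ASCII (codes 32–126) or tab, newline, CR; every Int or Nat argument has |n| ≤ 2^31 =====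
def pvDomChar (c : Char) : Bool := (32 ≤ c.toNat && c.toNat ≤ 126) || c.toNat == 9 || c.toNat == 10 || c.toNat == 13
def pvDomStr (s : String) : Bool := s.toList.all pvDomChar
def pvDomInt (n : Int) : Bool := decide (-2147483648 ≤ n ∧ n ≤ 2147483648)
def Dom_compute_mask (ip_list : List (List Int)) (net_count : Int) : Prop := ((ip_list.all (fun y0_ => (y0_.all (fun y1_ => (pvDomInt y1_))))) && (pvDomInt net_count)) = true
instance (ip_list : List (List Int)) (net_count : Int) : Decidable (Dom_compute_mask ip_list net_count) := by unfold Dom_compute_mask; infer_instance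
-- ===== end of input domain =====

-- B replaces A's two nested linear scans (over octet index and over mask bits) by two
-- binary searches on the monotone distinct-network counts; equivalence is on the return value.

-- ===== PORT A =====
def maskElem : List Int := [128, 64, 32, 16, 8, 4, 2, 1]

-- diff = set(tuple(ip[:i+1]) for ip in ip_list), built by the loop 'for ip: diff.add(...)'
def aDiff (ip_list : List (List Int)) (i : Nat) : PySem.Set (List Int) :=
  ip_list.foldl (fun s ip => PySem.Set.add s (ip.take (i + 1))) PySem.Set.empty

-- abs_diff for the inner loop; ip[i] is in range on Pre_ (getD 0 is never used there)
def aAbs (ip_list : List (List Int)) (i : Nat) (cur : Int) : PySem.Set (List Int) :=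
  ip_list.foldl
    (fun s ip =>
      PySem.Set.add s (ip.take i ++ [PySem.Int.band ((PySem.List.pyGet? ip (i : Int)).getD 0) cur]))
    PySem.Set.empty

def aJLoop (ip_list : List (List Int)) (net_count : Int) (i : Nat) (cur : Int) : List Int → String
  | [] => "-1"
  | m :: rest =>
    let cur2 := cur + m
    let c := PySem.List.len (aAbs ip_list i cur2)
    if c = net_count then
      PySem.Str.join "." (List.replicate i "255" ++ [PySem.Int.toStr cur2] ++ List.replicate (3 - i) "0")
    else if c > net_count then "-1"
    else aJLoop ip_list net_count i cur2 rest

def aILoop (ip_list : List (List Int)) (net_count : Int) : List Nat → String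
  | [] => "-1"
  | i :: rest =>
    if PySem.List.len (aDiff ip_list i) ≥ net_count then aJLoop ip_list net_count i 0 maskElem
    else aILoop ip_list net_count rest

def compute_mask (ip_list : List (List Int)) (net_count : Int) : String :=
  aILoop ip_list net_count [0, 1, 2, 3]

-- ===== PORT B =====
-- len({tuple(ip[:i+1]) for ip in ip_list})
def bPrefCount (ip_list : List (List Int)) (k : Int) : Int :=
  PySem.List.len (PySem.Set.ofList (ip_list.map (fun ip => ip.take (k + 1).toNat)))

-- block = 256 - (1 << (7 - j))
def bBlock (k : Int) : Int := 256 - ((1 : Int) <<< (7 - k).toNat)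

-- len({tuple(ip[:i]) + (ip[i] & block,) for ip in ip_list}); ip[i] in range on Pre_
def bMaskedCount (ip_list : List (List Int)) (i k : Int) : Int :=
  PySem.List.len (PySem.Set.ofList (ip_list.map (fun ip =>
    ip.take i.toNat ++ [PySem.Int.band ((PySem.List.pyGet? ip i).getD 0) (bBlock k)])))

-- lowest(lo, hi, pred): binary search for the smallest mid with pred(mid), ans = -1 if none.
-- The while loop is ported with fuel = the initial interval length, which bounds its iterations.
def bLowest (pred : Int → Bool) : Nat → Int → Int → Int → Int
  | 0, _, _, ans => ans
  | fuel + 1, lo, hi, ans =>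
    if lo ≤ hi then
      let mid := PySem.Int.floordiv (lo + hi) 2
      if pred mid then bLowest pred fuel lo (mid - 1) mid
      else bLowest pred fuel (mid + 1) hi ans
    else ans

-- the code after the first search (helper decomposition of Source B's tail)
def bTail (ip_list : List (List Int)) (net_count : Int) (i : Int) : String :=
  let j := bLowest (fun k => decide (bMaskedCount ip_list i k ≥ net_count)) 8 0 7 (-1)
  if j < 0 then "-1"
  else if bMaskedCount ip_list i j ≠ net_count then "-1"
  else
    PySem.Str.join "."
      (List.replicate i.toNat "255" ++ [PySem.Int.toStr (bBlock j)] ++ List.replicate (3 - i.toNat) "0")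

def compute_mask_alt (ip_list : List (List Int)) (net_count : Int) : String :=
  let i := bLowest (fun k => decide (bPrefCount ip_list k ≥ net_count)) 4 0 3 (-1)
  if i < 0 then "-1" else bTail ip_list net_count i

-- ===== PRECONDITION & SPEC =====
-- number of distinct length-m prefixes of the addresses
def pvDistinctPrefixes (ip_list : List (List Int)) (m : Nat) : Int :=
  PySem.List.len (PySem.List.dedup (ip_list.map (fun ip => ip.take m)))

-- Pre_ excludes exactly the inputs on which A raises IndexError: those where the first octet
-- position i whose count of distinct (i+1)-octet prefixes reaches net_count is an out-of-range
-- index for some address (B raises on exactly the same inputs); on every input A returns on,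
-- Pre_ holds.
def Pre_compute_mask (ip_list : List (List Int)) (net_count : Int) : Prop :=
  ∀ i : Nat, i < 4 →
    (net_count ≤ pvDistinctPrefixes ip_list (i + 1) ∧
      ∀ k : Nat, k < i → pvDistinctPrefixes ip_list (k + 1) < net_count) →
    ∀ ip ∈ ip_list, i < ip.length
instance (ip_list : List (List Int)) (net_count : Int) : Decidable (Pre_compute_mask ip_list net_count) := by unfold Pre_compute_mask; infer_instance

def pvWitness_compute_mask : List (List Int) × Int := ([[192, 168, 0, 1], [192, 168, 1, 7]], 2)

def Spec_compute_mask (ip_list : List (List Int)) (net_count : Int) (out : String) : Prop := out = compute_mask_alt ip_list net_count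
instance (ip_list : List (List Int)) (net_count : Int) (out : String) : Decidable (Spec_compute_mask ip_list net_count out) := by unfold Spec_compute_mask; infer_instance

-- ===== CLAIM (what is proved, stated in full; the proofs are below) =====
def Claim_equal_compute_mask : Prop := ∀ (ip_list : List (List Int)) (net_count : Int), Dom_compute_mask ip_list net_count → Pre_compute_mask ip_list net_count → Spec_compute_mask ip_list net_count (compute_mask ip_list net_count)

-- ===== LEMMAS AND PROOFS =====

-- a set-comprehension loop is ofList of the mapped list
theorem foldl_add_eq_ofList_map {α β : Type} [BEq β] (f : α → β) (l : List α) :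
    l.foldl (fun s x => PySem.Set.add s (f x)) PySem.Set.empty = PySem.Set.ofList (l.map f) := by
  rw [PySem.Set.ofList_eq_foldl, List.foldl_map]
  rfl

-- the number of distinct values of g ∘ f is at most the number of distinct values of f
theorem ofList_length_map_le {α β : Type} [DecidableEq α] [DecidableEq β]
    [BEq α] [LawfulBEq α] [BEq β] [LawfulBEq β] (g : α → β) (l : List α) :
    (PySem.Set.ofList (l.map g)).length ≤ (PySem.Set.ofList l).length := by
  have e1 : (PySem.Set.ofList l).length = l.toFinset.card := by
    rw [List.card_toFinset]
    exact ((List.perm_ext_iff_of_nodup (PySem.Set.nodup_ofList l) l.nodup_dedup).mpr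
      (by simp [PySem.Set.mem_ofList])).length_eq
  have e2 : (PySem.Set.ofList (l.map g)).length = (l.map g).toFinset.card := by
    rw [List.card_toFinset]
    exact ((List.perm_ext_iff_of_nodup (PySem.Set.nodup_ofList (l.map g)) (l.map g).nodup_dedup).mpr
      (by simp [PySem.Set.mem_ofList])).length_eq
  have e3 : (l.map g).toFinset = l.toFinset.image g := by ext x; simp
  rw [e1, e2, e3]
  exact Finset.card_image_le

-- Nat mask identity: AND with the top-bits mask 2^8 - 2^s keeps bits s..7
set_option maxRecDepth 4096 in
theorem natMask (a : Nat) (s : Nat) (hs : s ≤ 8) :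
    a &&& (2 ^ 8 - 2 ^ s) = a % 256 - a % 2 ^ s := by
  have hM : 2 ^ 8 - 2 ^ s < 256 := by
    have : 0 < 2 ^ s := Nat.two_pow_pos s
    omega
  have key : ∀ b < 256, ∀ t < 9, b &&& (2 ^ 8 - 2 ^ t) = b - b % 2 ^ t := by decide
  have h255 : (255 : Nat) &&& (2 ^ 8 - 2 ^ s) = 2 ^ 8 - 2 ^ s := by
    rw [Nat.and_comm]
    have := Nat.and_two_pow_sub_one_eq_mod (2 ^ 8 - 2 ^ s) 8
    norm_num at this
    omega
  have hsplit : a &&& (2 ^ 8 - 2 ^ s) = (a % 256) &&& (2 ^ 8 - 2 ^ s) := by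
    conv_lhs => rw [← h255, ← Nat.and_assoc]
    have ha : a &&& 255 = a % 256 := by
      have := Nat.and_two_pow_sub_one_eq_mod a 8
      norm_num at this
      exact this
    rw [ha]
  have hmod : a % 2 ^ s = (a % 256) % 2 ^ s := by
    rw [Nat.mod_mod_of_dvd]
    exact pow_dvd_pow 2 hs
  rw [hsplit, hmod, key (a % 256) (Nat.mod_lt a (by norm_num)) s (by omega)]

-- Python-exact band of any integer with a top-bits mask, via floor-mods
theorem bandMask (x : Int) (s : Nat) (hs : s ≤ 8) :
    PySem.Int.band x (256 - 2 ^ s) = PySem.Int.mod x 256 - PySem.Int.mod x (2 ^ s) := by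
  have hpos : (0:Int) < 2 ^ s := by positivity
  rw [PySem.Int.mod_eq_emod_of_pos (by norm_num), PySem.Int.mod_eq_emod_of_pos hpos]
  have hM : (0:Int) ≤ 256 - 2 ^ s := by
    have : (2:Int) ^ s ≤ 2 ^ 8 := pow_le_pow_right₀ (by norm_num) hs
    norm_num at this ⊢; omega
  have hMn : (256 - 2 ^ s : Int).toNat = 2 ^ 8 - 2 ^ s := by
    have : (2:Int) ^ s = ((2 ^ s : Nat) : Int) := by push_cast; ring
    rw [this]; omega
  rcases Classical.em ((0:Int) ≤ x) with hx | hx0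
  · rw [PySem.Int.band_of_nonneg hx hM, hMn, natMask x.toNat s hs]
    have h1 : x.toNat % 2 ^ s ≤ x.toNat % 256 := by
      calc x.toNat % 2 ^ s = (x.toNat % 256) % 2 ^ s := by
            rw [Nat.mod_mod_of_dvd]; exact pow_dvd_pow 2 hs
        _ ≤ x.toNat % 256 := Nat.mod_le _ _
    have h2 : (2:Int) ^ s = ((2 ^ s : Nat) : Int) := by push_cast; ring
    rw [h2]
    have e1 : x % 256 = ((x.toNat % 256 : Nat) : Int) := by omega
    have e2 : x % ((2 ^ s : Nat) : Int) = ((x.toNat % 2 ^ s : Nat) : Int) := by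
      rw [show x = (x.toNat : Int) by omega, Int.ofNat_mod_ofNat]
      simp
    omega
  · have hxn : ¬ (0:Int) ≤ x := hx0
    have hx : x < 0 := by omega
    simp only [PySem.Int.band, if_neg hxn, if_pos hM]
    rw [hMn]
    have hand : (2 ^ 8 - 2 ^ s) &&& (-x - 1).toNat = (-x-1).toNat % 256 - (-x-1).toNat % 2 ^ s := by
      rw [Nat.and_comm]; exact natMask _ s hs
    rw [hand]
    have h2 : (2:Int) ^ s = ((2 ^ s : Nat) : Int) := by push_cast; ring
    rw [h2]
    set u := (-x - 1).toNat with hu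
    have hxu : x = -(u : Int) - 1 := by omega
    have h1 : u % 2 ^ s ≤ u % 256 := by
      calc u % 2 ^ s = (u % 256) % 2 ^ s := by
            rw [Nat.mod_mod_of_dvd]; exact pow_dvd_pow 2 hs
        _ ≤ u % 256 := Nat.mod_le _ _
    -- x % 256 = 255 - u % 256 ; x % 2^s = 2^s - 1 - u % 2^s
    have e1 : x % 256 = 255 - ((u % 256 : Nat) : Int) := by omega
    have e2 : x % ((2 ^ s : Nat) : Int) = ((2 ^ s : Nat) : Int) - 1 - ((u % 2 ^ s : Nat) : Int) := by
      set P : Int := ((2 ^ s : Nat) : Int) with hP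
      have hPpos : 0 < P := by have := Nat.two_pow_pos s; omega
      have hr : (u % 2 ^ s : Nat) < 2 ^ s := Nat.mod_lt _ (Nat.two_pow_pos s)
      have hdecomp : x = (P - 1 - ((u % 2 ^ s : Nat) : Int)) + P * (-(((u / 2 ^ s : Nat) : Int)) - 1) := by
        have := Nat.div_add_mod u (2 ^ s)
        push_cast
        push_cast at this
        rw [hxu]
        nlinarith [this]
      rw [hdecomp, Int.add_mul_emod_self_left, Int.emod_eq_of_lt (by omega) (by omega)]
    have hsn : (2 ^ 8 - 2 ^ s : Nat) % 256 = 2 ^ 8 - 2 ^ s := by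
      apply Nat.mod_eq_of_lt; have := Nat.two_pow_pos s; omega
    have hpow : 0 < 2 ^ s := Nat.two_pow_pos s
    have h3 : (u % 256) - (u % 2 ^ s) ≤ 256 - 2 ^ s := by
      have e : u % 2 ^ s = (u % 256) % 2 ^ s := by
        rw [Nat.mod_mod_of_dvd]; exact pow_dvd_pow 2 hs
      rw [e]
      have h4 : u % 256 - (u % 256) % 2 ^ s = 2 ^ s * ((u % 256) / 2 ^ s) := by
        have h := Nat.div_add_mod (u % 256) (2 ^ s)
        omega
      rw [h4]
      have h5 : (u % 256) / 2 ^ s ≤ 255 / 2 ^ s := by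
        apply Nat.div_le_div_right
        have := Nat.mod_lt u (show 0 < 256 by norm_num); omega
      calc 2 ^ s * ((u % 256) / 2 ^ s) ≤ 2 ^ s * (255 / 2 ^ s) := Nat.mul_le_mul_left _ h5
        _ ≤ 256 - 2 ^ s := by interval_cases s <;> norm_num
    omega

theorem emod_le_self (a b : Int) (h0 : 0 ≤ a) (hb : 0 < b) : a % b ≤ a := by
  rcases Classical.em (a < b) with h | h
  · rw [Int.emod_eq_of_lt h0 h]
  · have := Int.emod_lt_of_pos a hb; omega

-- masking by a coarser top-bits mask after a finer one is masking by the coarser one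
theorem band_absorb (x : Int) (s1 s2 : Nat) (h21 : s2 ≤ s1) (h1 : s1 ≤ 8) :
    PySem.Int.band (PySem.Int.band x (256 - 2 ^ s2)) (256 - 2 ^ s1)
      = PySem.Int.band x (256 - 2 ^ s1) := by
  rw [bandMask x s2 (le_trans h21 h1), bandMask _ s1 h1, bandMask x s1 h1]
  have hp1 : (0:Int) < 2 ^ s1 := by positivity
  have hp2 : (0:Int) < 2 ^ s2 := by positivity
  simp only [PySem.Int.mod_eq_emod_of_pos hp1, PySem.Int.mod_eq_emod_of_pos hp2,
    PySem.Int.mod_eq_emod_of_pos (show (0:Int) < 256 by norm_num)]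
  set X := x % 256 with hX
  set Y1 := x % 2 ^ s1 with hY1
  set Y2 := x % 2 ^ s2 with hY2
  have hXb : 0 ≤ X ∧ X < 256 := ⟨Int.emod_nonneg x (by norm_num), Int.emod_lt_of_pos x (by norm_num)⟩
  have hY1b : 0 ≤ Y1 ∧ Y1 < 2 ^ s1 := ⟨Int.emod_nonneg x (by positivity), Int.emod_lt_of_pos x hp1⟩
  have hd1 : (2:Int) ^ s1 ∣ 256 := by
    have : (2:Int) ^ s1 ∣ 2 ^ 8 := pow_dvd_pow 2 h1
    norm_num at this; exact_mod_cast this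
  have hd2 : (2:Int) ^ s2 ∣ 2 ^ s1 := pow_dvd_pow 2 h21
  have hXY1 : X % 2 ^ s1 = Y1 := by rw [hX, hY1, Int.emod_emod_of_dvd x hd1]
  have hXY2 : Y1 % 2 ^ s2 = Y2 := by rw [hY1, hY2, Int.emod_emod_of_dvd x hd2]
  have hY2Y1 : Y2 ≤ Y1 := by rw [← hXY2]; exact emod_le_self Y1 _ hY1b.1 hp2
  have hY2X : Y2 ≤ X := by
    have : Y1 ≤ X := by rw [← hXY1]; exact emod_le_self X _ hXb.1 hp1
    omega
  have hA : (X - Y2) % 256 = X - Y2 := Int.emod_eq_of_lt (by omega) (by omega)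
  have hB : (X - Y2) % 2 ^ s1 = Y1 - Y2 := by
    have hdec : X - Y2 = (Y1 - Y2) + 2 ^ s1 * (X / 2 ^ s1) := by
      have := Int.emod_add_mul_ediv X (2 ^ s1)
      rw [hXY1] at this
      omega
    rw [hdec, Int.add_mul_emod_self_left]
    have hY2b : 0 ≤ Y2 := Int.emod_nonneg x (by positivity)
    exact Int.emod_eq_of_lt (by omega) (by omega)
  rw [hA, hB]
  have : X - Y2 - (Y1 - Y2) = X - Y1 := by ring
  linarith [this]

theorem bBlock_eq_pow (k : Int) : bBlock k = 256 - 2 ^ (7 - k).toNat := by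
  simp [bBlock, Int.shiftLeft_eq]

theorem aDiff_len_eq (ip_list : List (List Int)) (i : Nat) :
    PySem.List.len (aDiff ip_list i) = bPrefCount ip_list (i : Int) := by
  rw [aDiff, foldl_add_eq_ofList_map, bPrefCount,
      show ((i : Int) + 1).toNat = i + 1 by omega]

theorem aAbs_len_eq (ip_list : List (List Int)) (i : Nat) (k : Int) :
    PySem.List.len (aAbs ip_list i (bBlock k)) = bMaskedCount ip_list (i : Int) k := by
  rw [aAbs, foldl_add_eq_ofList_map, bMaskedCount, Int.toNat_natCast]

theorem bPrefCount_mono (ip_list : List (List Int)) (a b : Int) (h0 : 0 ≤ a) (hab : a ≤ b) :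
    bPrefCount ip_list a ≤ bPrefCount ip_list b := by
  rw [bPrefCount, bPrefCount, PySem.List.len_eq, PySem.List.len_eq]
  have hmap : ip_list.map (fun ip => ip.take (a + 1).toNat)
      = (ip_list.map (fun ip => ip.take (b + 1).toNat)).map (fun ys => ys.take (a + 1).toNat) := by
    rw [List.map_map]
    apply List.map_congr_left
    intro ip _
    simp only [Function.comp]
    rw [List.take_take, min_eq_left (by omega)]
  rw [hmap]
  exact_mod_cast ofList_length_map_le _ _

theorem bMaskedCount_mono (ip_list : List (List Int)) (i : Int)
    (hpre : ∀ ip ∈ ip_list, i.toNat ≤ ip.length)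
    (a b : Int) (h0 : 0 ≤ a) (hab : a ≤ b) :
    bMaskedCount ip_list i a ≤ bMaskedCount ip_list i b := by
  rw [bMaskedCount, bMaskedCount, PySem.List.len_eq, PySem.List.len_eq]
  have hmap : ip_list.map (fun ip =>
        ip.take i.toNat ++ [PySem.Int.band ((PySem.List.pyGet? ip i).getD 0) (bBlock a)])
      = (ip_list.map (fun ip =>
        ip.take i.toNat ++ [PySem.Int.band ((PySem.List.pyGet? ip i).getD 0) (bBlock b)])).map
        (fun ys => ys.take i.toNat ++ [PySem.Int.band (ys.getD i.toNat 0) (bBlock a)]) := by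
    rw [List.map_map]
    apply List.map_congr_left
    intro ip hip
    simp only [Function.comp]
    have hlen : (ip.take i.toNat).length = i.toNat := by
      rw [List.length_take]
      have := hpre ip hip
      omega
    rw [List.take_left' hlen, List.getD_eq_getElem?_getD,
        List.getElem?_append_right (ge_of_eq hlen.symm), hlen, Nat.sub_self]
    simp only [List.getElem?_cons_zero, Option.getD_some]
    rw [bBlock_eq_pow, bBlock_eq_pow,
        band_absorb _ (7 - a).toNat (7 - b).toNat (by omega) (by omega)]
  rw [hmap]
  exact_mod_cast ofList_length_map_le _ _

-- binary-search correctness for a monotone predicate on [0, hi0]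
theorem bLowest_go (pred : Int → Bool) (hi0 : Int)
    (mono : ∀ a b : Int, 0 ≤ a → a ≤ b → b ≤ hi0 → pred a = true → pred b = true) :
    ∀ (fuel : Nat) (lo hi ans : Int),
      hi + 1 - lo ≤ (fuel : Int) → 0 ≤ lo → hi ≤ hi0 →
      (∀ L, 0 ≤ L → L < lo → pred L = false) →
      ((ans = -1 ∧ hi = hi0) ∨ (0 ≤ ans ∧ ans ≤ hi0 ∧ ans = hi + 1 ∧ pred ans = true)) →
      ((bLowest pred fuel lo hi ans = -1 ∧ ∀ L, 0 ≤ L → L ≤ hi0 → pred L = false)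
       ∨ (∃ L, bLowest pred fuel lo hi ans = L ∧ 0 ≤ L ∧ L ≤ hi0 ∧ pred L = true
          ∧ ∀ L', 0 ≤ L' → L' < L → pred L' = false)) := by
  intro fuel
  induction fuel with
  | zero =>
    intro lo hi ans hfuel hlo hhi hbelow hinv
    simp only [bLowest]
    rcases hinv with ⟨rfl, rfl⟩ | ⟨h0, h1, h2, h3⟩
    · exact Or.inl ⟨rfl, fun L hL0 hL1 => hbelow L hL0 (by omega)⟩
    · exact Or.inr ⟨ans, rfl, h0, h1, h3, fun L' hL0 hL1 => hbelow L' hL0 (by omega)⟩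
  | succ fuel ih =>
    intro lo hi ans hfuel hlo hhi hbelow hinv
    simp only [bLowest]
    by_cases hlh : lo ≤ hi
    · rw [if_pos hlh]
      have hmid := PySem.Int.floordiv_two_mid_bounds hlh
      set mid := PySem.Int.floordiv (lo + hi) 2 with hmiddef
      by_cases hp : pred mid = true
      · rw [if_pos hp]
        exact ih lo (mid - 1) mid (by omega) hlo (by omega) hbelow
          (Or.inr ⟨by omega, by omega, by omega, hp⟩)
      · rw [if_neg hp]
        apply ih (mid + 1) hi ans (by omega) (by omega) hhi
        · intro L hL0 hL1
          by_cases hLlo : L < lo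
          · exact hbelow L hL0 hLlo
          · rcases Bool.eq_false_or_eq_true (pred L) with h | h
            · exact absurd (mono L mid hL0 (by omega) (by omega) h) hp
            · exact h
        · exact hinv
    · rw [if_neg hlh]
      rcases hinv with ⟨rfl, rfl⟩ | ⟨h0, h1, h2, h3⟩
      · exact Or.inl ⟨rfl, fun L hL0 hL1 => hbelow L hL0 (by omega)⟩
      · exact Or.inr ⟨ans, rfl, h0, h1, h3, fun L' hL0 hL1 => hbelow L' hL0 (by omega)⟩

theorem bLowest_spec (pred : Int → Bool) (hi0 : Int)
    (mono : ∀ a b : Int, 0 ≤ a → a ≤ b → b ≤ hi0 → pred a = true → pred b = true)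
    (fuel : Nat) (hfuel : hi0 + 1 ≤ (fuel : Int)) :
    (bLowest pred fuel 0 hi0 (-1) = -1 ∧ ∀ L, 0 ≤ L → L ≤ hi0 → pred L = false)
    ∨ (∃ L, bLowest pred fuel 0 hi0 (-1) = L ∧ 0 ≤ L ∧ L ≤ hi0 ∧ pred L = true
        ∧ ∀ L', 0 ≤ L' → L' < L → pred L' = false) :=
  bLowest_go pred hi0 mono fuel 0 hi0 (-1) (by omega) le_rfl le_rfl
    (fun L h1 h2 => absurd (lt_of_le_of_lt h1 h2) (lt_irrefl 0)) (Or.inl ⟨rfl, rfl⟩)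

theorem pref_bridge (ip_list : List (List Int)) (k : Nat) :
    pvDistinctPrefixes ip_list (k + 1) = bPrefCount ip_list (k : Int) := by
  rw [pvDistinctPrefixes, bPrefCount, PySem.List.dedup_eq_ofList,
      show ((k : Int) + 1).toNat = k + 1 by omega]

theorem phase2_eq (ip_list : List (List Int)) (net_count : Int) (i : Nat)
    (hpre : ∀ ip ∈ ip_list, i < ip.length) (hi : i ≤ 3) :
    aJLoop ip_list net_count i 0 maskElem = bTail ip_list net_count (i : Int) := by
  have c0 : PySem.List.len (aAbs ip_list i 128) = bMaskedCount ip_list (i:Int) 0 := by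
    have h := aAbs_len_eq ip_list i 0; rwa [show bBlock 0 = (128:Int) from by decide] at h
  have c1 : PySem.List.len (aAbs ip_list i 192) = bMaskedCount ip_list (i:Int) 1 := by
    have h := aAbs_len_eq ip_list i 1; rwa [show bBlock 1 = (192:Int) from by decide] at h
  have c2 : PySem.List.len (aAbs ip_list i 224) = bMaskedCount ip_list (i:Int) 2 := by
    have h := aAbs_len_eq ip_list i 2; rwa [show bBlock 2 = (224:Int) from by decide] at h
  have c3 : PySem.List.len (aAbs ip_list i 240) = bMaskedCount ip_list (i:Int) 3 := by
    have h := aAbs_len_eq ip_list i 3; rwa [show bBlock 3 = (240:Int) from by decide] at h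
  have c4 : PySem.List.len (aAbs ip_list i 248) = bMaskedCount ip_list (i:Int) 4 := by
    have h := aAbs_len_eq ip_list i 4; rwa [show bBlock 4 = (248:Int) from by decide] at h
  have c5 : PySem.List.len (aAbs ip_list i 252) = bMaskedCount ip_list (i:Int) 5 := by
    have h := aAbs_len_eq ip_list i 5; rwa [show bBlock 5 = (252:Int) from by decide] at h
  have c6 : PySem.List.len (aAbs ip_list i 254) = bMaskedCount ip_list (i:Int) 6 := by
    have h := aAbs_len_eq ip_list i 6; rwa [show bBlock 6 = (254:Int) from by decide] at h
  have c7 : PySem.List.len (aAbs ip_list i 255) = bMaskedCount ip_list (i:Int) 7 := by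
    have h := aAbs_len_eq ip_list i 7; rwa [show bBlock 7 = (255:Int) from by decide] at h
  simp only [PySem.List.len_eq] at c0 c1 c2 c3 c4 c5 c6 c7
  have hmono : ∀ a b : Int, 0 ≤ a → a ≤ b → b ≤ 7 →
      decide (bMaskedCount ip_list (i:Int) a ≥ net_count) = true →
      decide (bMaskedCount ip_list (i:Int) b ≥ net_count) = true := by
    intro a b h0 hab hb ha
    simp only [decide_eq_true_eq] at *
    refine le_trans ha (bMaskedCount_mono ip_list (i:Int) ?_ a b h0 hab)
    intro ip hip
    have := hpre ip hip
    omega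
  rcases bLowest_spec _ 7 hmono 8 (by norm_num) with ⟨hres, hall⟩ | ⟨L, hres, hL0, hL7, hpL, hmin⟩
  · have hk : ∀ k : Int, 0 ≤ k → k ≤ 7 → bMaskedCount ip_list (i:Int) k < net_count := by
      intro k h1 h2
      have := hall k h1 h2
      simp only [decide_eq_false_iff_not, not_le] at this
      exact this
    have ne0 : ¬(bMaskedCount ip_list (i:Int) 0 = net_count) := by
      have := hk 0 (by norm_num) (by norm_num); omega
    have ng0 : ¬(net_count < bMaskedCount ip_list (i:Int) 0) := by
      have := hk 0 (by norm_num) (by norm_num); omega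
    have ne1 : ¬(bMaskedCount ip_list (i:Int) 1 = net_count) := by
      have := hk 1 (by norm_num) (by norm_num); omega
    have ng1 : ¬(net_count < bMaskedCount ip_list (i:Int) 1) := by
      have := hk 1 (by norm_num) (by norm_num); omega
    have ne2 : ¬(bMaskedCount ip_list (i:Int) 2 = net_count) := by
      have := hk 2 (by norm_num) (by norm_num); omega
    have ng2 : ¬(net_count < bMaskedCount ip_list (i:Int) 2) := by
      have := hk 2 (by norm_num) (by norm_num); omega
    have ne3 : ¬(bMaskedCount ip_list (i:Int) 3 = net_count) := by
      have := hk 3 (by norm_num) (by norm_num); omega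
    have ng3 : ¬(net_count < bMaskedCount ip_list (i:Int) 3) := by
      have := hk 3 (by norm_num) (by norm_num); omega
    have ne4 : ¬(bMaskedCount ip_list (i:Int) 4 = net_count) := by
      have := hk 4 (by norm_num) (by norm_num); omega
    have ng4 : ¬(net_count < bMaskedCount ip_list (i:Int) 4) := by
      have := hk 4 (by norm_num) (by norm_num); omega
    have ne5 : ¬(bMaskedCount ip_list (i:Int) 5 = net_count) := by
      have := hk 5 (by norm_num) (by norm_num); omega
    have ng5 : ¬(net_count < bMaskedCount ip_list (i:Int) 5) := by
      have := hk 5 (by norm_num) (by norm_num); omega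
    have ne6 : ¬(bMaskedCount ip_list (i:Int) 6 = net_count) := by
      have := hk 6 (by norm_num) (by norm_num); omega
    have ng6 : ¬(net_count < bMaskedCount ip_list (i:Int) 6) := by
      have := hk 6 (by norm_num) (by norm_num); omega
    have ne7 : ¬(bMaskedCount ip_list (i:Int) 7 = net_count) := by
      have := hk 7 (by norm_num) (by norm_num); omega
    have ng7 : ¬(net_count < bMaskedCount ip_list (i:Int) 7) := by
      have := hk 7 (by norm_num) (by norm_num); omega
    rw [bTail, hres]
    norm_num [aJLoop, maskElem, c0, c1, c2, c3, c4, c5, c6, c7, ne0, ne1, ne2, ne3, ne4, ne5, ne6, ne7, ng0, ng1, ng2, ng3, ng4, ng5, ng6, ng7]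
  · simp only [bTail]
    rw [hres]
    have hge : net_count ≤ bMaskedCount ip_list (i:Int) L := by simpa using hpL
    have hlt : ∀ k : Int, 0 ≤ k → k < L → bMaskedCount ip_list (i:Int) k < net_count := by
      intro k h1 h2
      have := hmin k h1 h2
      simp only [decide_eq_false_iff_not, not_le] at this
      exact this
    interval_cases L
    · rw [if_neg (by norm_num)]
      by_cases hc : bMaskedCount ip_list (i:Int) 0 = net_count
      · rw [if_neg (by omega)]
        norm_num [aJLoop, maskElem, c0, hc, show bBlock 0 = (128:Int) from by decide,
          Int.toNat_natCast]
      · rw [if_pos (by omega)]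
        have hgt : net_count < bMaskedCount ip_list (i:Int) 0 := by omega
        norm_num [aJLoop, maskElem, c0, hc, hgt]
    · rw [if_neg (by norm_num)]
      have ne0 : ¬(bMaskedCount ip_list (i:Int) 0 = net_count) := by
        have := hlt 0 (by norm_num) (by norm_num); omega
      have ng0 : ¬(net_count < bMaskedCount ip_list (i:Int) 0) := by
        have := hlt 0 (by norm_num) (by norm_num); omega
      by_cases hc : bMaskedCount ip_list (i:Int) 1 = net_count
      · rw [if_neg (by omega)]
        norm_num [aJLoop, maskElem, c0, c1, ne0, ng0, hc, show bBlock 1 = (192:Int) from by decide,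
          Int.toNat_natCast]
      · rw [if_pos (by omega)]
        have hgt : net_count < bMaskedCount ip_list (i:Int) 1 := by omega
        norm_num [aJLoop, maskElem, c0, c1, ne0, ng0, hc, hgt]
    · rw [if_neg (by norm_num)]
      have ne0 : ¬(bMaskedCount ip_list (i:Int) 0 = net_count) := by
        have := hlt 0 (by norm_num) (by norm_num); omega
      have ng0 : ¬(net_count < bMaskedCount ip_list (i:Int) 0) := by
        have := hlt 0 (by norm_num) (by norm_num); omega
      have ne1 : ¬(bMaskedCount ip_list (i:Int) 1 = net_count) := by
        have := hlt 1 (by norm_num) (by norm_num); omega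
      have ng1 : ¬(net_count < bMaskedCount ip_list (i:Int) 1) := by
        have := hlt 1 (by norm_num) (by norm_num); omega
      by_cases hc : bMaskedCount ip_list (i:Int) 2 = net_count
      · rw [if_neg (by omega)]
        norm_num [aJLoop, maskElem, c0, c1, c2, ne0, ne1, ng0, ng1, hc, show bBlock 2 = (224:Int) from by decide,
          Int.toNat_natCast]
      · rw [if_pos (by omega)]
        have hgt : net_count < bMaskedCount ip_list (i:Int) 2 := by omega
        norm_num [aJLoop, maskElem, c0, c1, c2, ne0, ne1, ng0, ng1, hc, hgt]
    · rw [if_neg (by norm_num)]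
      have ne0 : ¬(bMaskedCount ip_list (i:Int) 0 = net_count) := by
        have := hlt 0 (by norm_num) (by norm_num); omega
      have ng0 : ¬(net_count < bMaskedCount ip_list (i:Int) 0) := by
        have := hlt 0 (by norm_num) (by norm_num); omega
      have ne1 : ¬(bMaskedCount ip_list (i:Int) 1 = net_count) := by
        have := hlt 1 (by norm_num) (by norm_num); omega
      have ng1 : ¬(net_count < bMaskedCount ip_list (i:Int) 1) := by
        have := hlt 1 (by norm_num) (by norm_num); omega
      have ne2 : ¬(bMaskedCount ip_list (i:Int) 2 = net_count) := by
        have := hlt 2 (by norm_num) (by norm_num); omega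
      have ng2 : ¬(net_count < bMaskedCount ip_list (i:Int) 2) := by
        have := hlt 2 (by norm_num) (by norm_num); omega
      by_cases hc : bMaskedCount ip_list (i:Int) 3 = net_count
      · rw [if_neg (by omega)]
        norm_num [aJLoop, maskElem, c0, c1, c2, c3, ne0, ne1, ne2, ng0, ng1, ng2, hc, show bBlock 3 = (240:Int) from by decide,
          Int.toNat_natCast]
      · rw [if_pos (by omega)]
        have hgt : net_count < bMaskedCount ip_list (i:Int) 3 := by omega
        norm_num [aJLoop, maskElem, c0, c1, c2, c3, ne0, ne1, ne2, ng0, ng1, ng2, hc, hgt]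
    · rw [if_neg (by norm_num)]
      have ne0 : ¬(bMaskedCount ip_list (i:Int) 0 = net_count) := by
        have := hlt 0 (by norm_num) (by norm_num); omega
      have ng0 : ¬(net_count < bMaskedCount ip_list (i:Int) 0) := by
        have := hlt 0 (by norm_num) (by norm_num); omega
      have ne1 : ¬(bMaskedCount ip_list (i:Int) 1 = net_count) := by
        have := hlt 1 (by norm_num) (by norm_num); omega
      have ng1 : ¬(net_count < bMaskedCount ip_list (i:Int) 1) := by
        have := hlt 1 (by norm_num) (by norm_num); omega
      have ne2 : ¬(bMaskedCount ip_list (i:Int) 2 = net_count) := by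
        have := hlt 2 (by norm_num) (by norm_num); omega
      have ng2 : ¬(net_count < bMaskedCount ip_list (i:Int) 2) := by
        have := hlt 2 (by norm_num) (by norm_num); omega
      have ne3 : ¬(bMaskedCount ip_list (i:Int) 3 = net_count) := by
        have := hlt 3 (by norm_num) (by norm_num); omega
      have ng3 : ¬(net_count < bMaskedCount ip_list (i:Int) 3) := by
        have := hlt 3 (by norm_num) (by norm_num); omega
      by_cases hc : bMaskedCount ip_list (i:Int) 4 = net_count
      · rw [if_neg (by omega)]
        norm_num [aJLoop, maskElem, c0, c1, c2, c3, c4, ne0, ne1, ne2, ne3, ng0, ng1, ng2, ng3, hc, show bBlock 4 = (248:Int) from by decide,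
          Int.toNat_natCast]
      · rw [if_pos (by omega)]
        have hgt : net_count < bMaskedCount ip_list (i:Int) 4 := by omega
        norm_num [aJLoop, maskElem, c0, c1, c2, c3, c4, ne0, ne1, ne2, ne3, ng0, ng1, ng2, ng3, hc, hgt]
    · rw [if_neg (by norm_num)]
      have ne0 : ¬(bMaskedCount ip_list (i:Int) 0 = net_count) := by
        have := hlt 0 (by norm_num) (by norm_num); omega
      have ng0 : ¬(net_count < bMaskedCount ip_list (i:Int) 0) := by
        have := hlt 0 (by norm_num) (by norm_num); omega
      have ne1 : ¬(bMaskedCount ip_list (i:Int) 1 = net_count) := by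
        have := hlt 1 (by norm_num) (by norm_num); omega
      have ng1 : ¬(net_count < bMaskedCount ip_list (i:Int) 1) := by
        have := hlt 1 (by norm_num) (by norm_num); omega
      have ne2 : ¬(bMaskedCount ip_list (i:Int) 2 = net_count) := by
        have := hlt 2 (by norm_num) (by norm_num); omega
      have ng2 : ¬(net_count < bMaskedCount ip_list (i:Int) 2) := by
        have := hlt 2 (by norm_num) (by norm_num); omega
      have ne3 : ¬(bMaskedCount ip_list (i:Int) 3 = net_count) := by
        have := hlt 3 (by norm_num) (by norm_num); omega
      have ng3 : ¬(net_count < bMaskedCount ip_list (i:Int) 3) := by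
        have := hlt 3 (by norm_num) (by norm_num); omega
      have ne4 : ¬(bMaskedCount ip_list (i:Int) 4 = net_count) := by
        have := hlt 4 (by norm_num) (by norm_num); omega
      have ng4 : ¬(net_count < bMaskedCount ip_list (i:Int) 4) := by
        have := hlt 4 (by norm_num) (by norm_num); omega
      by_cases hc : bMaskedCount ip_list (i:Int) 5 = net_count
      · rw [if_neg (by omega)]
        norm_num [aJLoop, maskElem, c0, c1, c2, c3, c4, c5, ne0, ne1, ne2, ne3, ne4, ng0, ng1, ng2, ng3, ng4, hc, show bBlock 5 = (252:Int) from by decide,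
          Int.toNat_natCast]
      · rw [if_pos (by omega)]
        have hgt : net_count < bMaskedCount ip_list (i:Int) 5 := by omega
        norm_num [aJLoop, maskElem, c0, c1, c2, c3, c4, c5, ne0, ne1, ne2, ne3, ne4, ng0, ng1, ng2, ng3, ng4, hc, hgt]
    · rw [if_neg (by norm_num)]
      have ne0 : ¬(bMaskedCount ip_list (i:Int) 0 = net_count) := by
        have := hlt 0 (by norm_num) (by norm_num); omega
      have ng0 : ¬(net_count < bMaskedCount ip_list (i:Int) 0) := by
        have := hlt 0 (by norm_num) (by norm_num); omega
      have ne1 : ¬(bMaskedCount ip_list (i:Int) 1 = net_count) := by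
        have := hlt 1 (by norm_num) (by norm_num); omega
      have ng1 : ¬(net_count < bMaskedCount ip_list (i:Int) 1) := by
        have := hlt 1 (by norm_num) (by norm_num); omega
      have ne2 : ¬(bMaskedCount ip_list (i:Int) 2 = net_count) := by
        have := hlt 2 (by norm_num) (by norm_num); omega
      have ng2 : ¬(net_count < bMaskedCount ip_list (i:Int) 2) := by
        have := hlt 2 (by norm_num) (by norm_num); omega
      have ne3 : ¬(bMaskedCount ip_list (i:Int) 3 = net_count) := by
        have := hlt 3 (by norm_num) (by norm_num); omega
      have ng3 : ¬(net_count < bMaskedCount ip_list (i:Int) 3) := by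
        have := hlt 3 (by norm_num) (by norm_num); omega
      have ne4 : ¬(bMaskedCount ip_list (i:Int) 4 = net_count) := by
        have := hlt 4 (by norm_num) (by norm_num); omega
      have ng4 : ¬(net_count < bMaskedCount ip_list (i:Int) 4) := by
        have := hlt 4 (by norm_num) (by norm_num); omega
      have ne5 : ¬(bMaskedCount ip_list (i:Int) 5 = net_count) := by
        have := hlt 5 (by norm_num) (by norm_num); omega
      have ng5 : ¬(net_count < bMaskedCount ip_list (i:Int) 5) := by
        have := hlt 5 (by norm_num) (by norm_num); omega
      by_cases hc : bMaskedCount ip_list (i:Int) 6 = net_count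
      · rw [if_neg (by omega)]
        norm_num [aJLoop, maskElem, c0, c1, c2, c3, c4, c5, c6, ne0, ne1, ne2, ne3, ne4, ne5, ng0, ng1, ng2, ng3, ng4, ng5, hc, show bBlock 6 = (254:Int) from by decide,
          Int.toNat_natCast]
      · rw [if_pos (by omega)]
        have hgt : net_count < bMaskedCount ip_list (i:Int) 6 := by omega
        norm_num [aJLoop, maskElem, c0, c1, c2, c3, c4, c5, c6, ne0, ne1, ne2, ne3, ne4, ne5, ng0, ng1, ng2, ng3, ng4, ng5, hc, hgt]
    · rw [if_neg (by norm_num)]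
      have ne0 : ¬(bMaskedCount ip_list (i:Int) 0 = net_count) := by
        have := hlt 0 (by norm_num) (by norm_num); omega
      have ng0 : ¬(net_count < bMaskedCount ip_list (i:Int) 0) := by
        have := hlt 0 (by norm_num) (by norm_num); omega
      have ne1 : ¬(bMaskedCount ip_list (i:Int) 1 = net_count) := by
        have := hlt 1 (by norm_num) (by norm_num); omega
      have ng1 : ¬(net_count < bMaskedCount ip_list (i:Int) 1) := by
        have := hlt 1 (by norm_num) (by norm_num); omega
      have ne2 : ¬(bMaskedCount ip_list (i:Int) 2 = net_count) := by
        have := hlt 2 (by norm_num) (by norm_num); omega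
      have ng2 : ¬(net_count < bMaskedCount ip_list (i:Int) 2) := by
        have := hlt 2 (by norm_num) (by norm_num); omega
      have ne3 : ¬(bMaskedCount ip_list (i:Int) 3 = net_count) := by
        have := hlt 3 (by norm_num) (by norm_num); omega
      have ng3 : ¬(net_count < bMaskedCount ip_list (i:Int) 3) := by
        have := hlt 3 (by norm_num) (by norm_num); omega
      have ne4 : ¬(bMaskedCount ip_list (i:Int) 4 = net_count) := by
        have := hlt 4 (by norm_num) (by norm_num); omega
      have ng4 : ¬(net_count < bMaskedCount ip_list (i:Int) 4) := by
        have := hlt 4 (by norm_num) (by norm_num); omega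
      have ne5 : ¬(bMaskedCount ip_list (i:Int) 5 = net_count) := by
        have := hlt 5 (by norm_num) (by norm_num); omega
      have ng5 : ¬(net_count < bMaskedCount ip_list (i:Int) 5) := by
        have := hlt 5 (by norm_num) (by norm_num); omega
      have ne6 : ¬(bMaskedCount ip_list (i:Int) 6 = net_count) := by
        have := hlt 6 (by norm_num) (by norm_num); omega
      have ng6 : ¬(net_count < bMaskedCount ip_list (i:Int) 6) := by
        have := hlt 6 (by norm_num) (by norm_num); omega
      by_cases hc : bMaskedCount ip_list (i:Int) 7 = net_count
      · rw [if_neg (by omega)]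
        norm_num [aJLoop, maskElem, c0, c1, c2, c3, c4, c5, c6, c7, ne0, ne1, ne2, ne3, ne4, ne5, ne6, ng0, ng1, ng2, ng3, ng4, ng5, ng6, hc, show bBlock 7 = (255:Int) from by decide,
          Int.toNat_natCast]
      · rw [if_pos (by omega)]
        have hgt : net_count < bMaskedCount ip_list (i:Int) 7 := by omega
        norm_num [aJLoop, maskElem, c0, c1, c2, c3, c4, c5, c6, c7, ne0, ne1, ne2, ne3, ne4, ne5, ne6, ng0, ng1, ng2, ng3, ng4, ng5, ng6, hc, hgt]

-- ===== VERDICT (by name: the statement is the Claim_ definition above) =====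
theorem compute_mask_spec : Claim_equal_compute_mask := by
  intro ip_list net_count hdom hpre
  unfold Pre_compute_mask at hpre
  unfold Spec_compute_mask
  have e0 : PySem.List.len (aDiff ip_list 0) = bPrefCount ip_list 0 := by
    have h := aDiff_len_eq ip_list 0; norm_num at h; exact h
  have e1 : PySem.List.len (aDiff ip_list 1) = bPrefCount ip_list 1 := by
    have h := aDiff_len_eq ip_list 1; norm_num at h; exact h
  have e2 : PySem.List.len (aDiff ip_list 2) = bPrefCount ip_list 2 := by
    have h := aDiff_len_eq ip_list 2; norm_num at h; exact h
  have e3 : PySem.List.len (aDiff ip_list 3) = bPrefCount ip_list 3 := by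
    have h := aDiff_len_eq ip_list 3; norm_num at h; exact h
  simp only [PySem.List.len_eq] at e0 e1 e2 e3
  have hmono : ∀ a b : Int, 0 ≤ a → a ≤ b → b ≤ 3 →
      decide (bPrefCount ip_list a ≥ net_count) = true →
      decide (bPrefCount ip_list b ≥ net_count) = true := by
    intro a b h0 hab hb ha
    simp only [decide_eq_true_eq] at *
    exact le_trans ha (bPrefCount_mono ip_list a b h0 hab)
  rcases bLowest_spec _ 3 hmono 4 (by norm_num) with ⟨hres, hall⟩ | ⟨L, hres, hL0, hL3, hpL, hmin⟩
  · have hk : ∀ k : Int, 0 ≤ k → k ≤ 3 → ¬ (net_count ≤ bPrefCount ip_list k) := by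
      intro k h1 h2
      have := hall k h1 h2
      simp only [decide_eq_false_iff_not, not_le] at this
      omega
    have f0 : ¬(net_count ≤ bPrefCount ip_list 0) := hk 0 (by norm_num) (by norm_num)
    have f1 : ¬(net_count ≤ bPrefCount ip_list 1) := hk 1 (by norm_num) (by norm_num)
    have f2 : ¬(net_count ≤ bPrefCount ip_list 2) := hk 2 (by norm_num) (by norm_num)
    have f3 : ¬(net_count ≤ bPrefCount ip_list 3) := hk 3 (by norm_num) (by norm_num)
    simp only [compute_mask_alt]
    rw [hres]
    norm_num [compute_mask, aILoop, e0, e1, e2, e3, f0, f1, f2, f3]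
  · have hge : net_count ≤ bPrefCount ip_list L := by simpa using hpL
    have hlt : ∀ k : Int, 0 ≤ k → k < L → ¬ (net_count ≤ bPrefCount ip_list k) := by
      intro k h1 h2
      have := hmin k h1 h2
      simp only [decide_eq_false_iff_not, not_le] at this
      omega
    interval_cases L
    · have hAside : compute_mask ip_list net_count = aJLoop ip_list net_count 0 0 maskElem := by
        norm_num [compute_mask, aILoop, e0, hge]
      have hBside : compute_mask_alt ip_list net_count = bTail ip_list net_count 0 := by
        simp only [compute_mask_alt]
        rw [hres]
        norm_num
      rw [hAside, hBside]
      have hrows : ∀ ip ∈ ip_list, 0 < ip.length := by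
        apply hpre 0 (by norm_num)
        constructor
        · rw [pref_bridge ip_list 0]
          simpa using hge
        · intro k hk
          have h := hlt (k : Int) (by omega) (by exact_mod_cast hk)
          rw [pref_bridge ip_list k]
          omega
      have h2 := phase2_eq ip_list net_count 0 hrows (by norm_num)
      simpa using h2
    · 
      have f0 : ¬(net_count ≤ bPrefCount ip_list 0) := hlt 0 (by norm_num) (by norm_num)
      have hAside : compute_mask ip_list net_count = aJLoop ip_list net_count 1 0 maskElem := by
        norm_num [compute_mask, aILoop, e0, e1, f0, hge]
      have hBside : compute_mask_alt ip_list net_count = bTail ip_list net_count 1 := by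
        simp only [compute_mask_alt]
        rw [hres]
        norm_num
      rw [hAside, hBside]
      have hrows : ∀ ip ∈ ip_list, 1 < ip.length := by
        apply hpre 1 (by norm_num)
        constructor
        · rw [pref_bridge ip_list 1]
          simpa using hge
        · intro k hk
          have h := hlt (k : Int) (by omega) (by exact_mod_cast hk)
          rw [pref_bridge ip_list k]
          omega
      have h2 := phase2_eq ip_list net_count 1 hrows (by norm_num)
      simpa using h2
    · 
      have f0 : ¬(net_count ≤ bPrefCount ip_list 0) := hlt 0 (by norm_num) (by norm_num)
      have f1 : ¬(net_count ≤ bPrefCount ip_list 1) := hlt 1 (by norm_num) (by norm_num)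
      have hAside : compute_mask ip_list net_count = aJLoop ip_list net_count 2 0 maskElem := by
        norm_num [compute_mask, aILoop, e0, e1, e2, f0, f1, hge]
      have hBside : compute_mask_alt ip_list net_count = bTail ip_list net_count 2 := by
        simp only [compute_mask_alt]
        rw [hres]
        norm_num
      rw [hAside, hBside]
      have hrows : ∀ ip ∈ ip_list, 2 < ip.length := by
        apply hpre 2 (by norm_num)
        constructor
        · rw [pref_bridge ip_list 2]
          simpa using hge
        · intro k hk
          have h := hlt (k : Int) (by omega) (by exact_mod_cast hk)
          rw [pref_bridge ip_list k]
          omega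
      have h2 := phase2_eq ip_list net_count 2 hrows (by norm_num)
      simpa using h2
    · 
      have f0 : ¬(net_count ≤ bPrefCount ip_list 0) := hlt 0 (by norm_num) (by norm_num)
      have f1 : ¬(net_count ≤ bPrefCount ip_list 1) := hlt 1 (by norm_num) (by norm_num)
      have f2 : ¬(net_count ≤ bPrefCount ip_list 2) := hlt 2 (by norm_num) (by norm_num)
      have hAside : compute_mask ip_list net_count = aJLoop ip_list net_count 3 0 maskElem := by
        norm_num [compute_mask, aILoop, e0, e1, e2, e3, f0, f1, f2, hge]
      have hBside : compute_mask_alt ip_list net_count = bTail ip_list net_count 3 := by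
        simp only [compute_mask_alt]
        rw [hres]
        norm_num
      rw [hAside, hBside]
      have hrows : ∀ ip ∈ ip_list, 3 < ip.length := by
        apply hpre 3 (by norm_num)
        constructor
        · rw [pref_bridge ip_list 3]
          simpa using hge
        · intro k hk
          have h := hlt (k : Int) (by omega) (by exact_mod_cast hk)
          rw [pref_bridge ip_list k]
          omega
      have h2 := phase2_eq ip_list net_count 3 hrows (by norm_num)
      simpa using h2
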